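-- pv_equiv track=rewrite | github.com/ClaraVanM/descriptors | CTD.py | ctd_transition
-- ===== SOURCE A (Python) =====
-- from itertools import product
--
-- properties = {"hydrophobicity":{"R":1, "K":1, "E":1, "D":1, "Q":1, "N":1,"G":2,"A":2,"S":2,"T":2,"P":2,"H":2,"Y":2,"C":3,"L":3,"V":3,"I":3,"M":3,"F":3,"W":3},
--               "normalized_vdw":{"G":1,"A":1,"S":1,"T":1,"P":1,"D":1,"N":2,"V":2,"E":2,"Q":2,"I":2,"L":2,"M":3,"H":3,"K":3,"F":3,"R":3,"Y":3,"W":3},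
--               "polarity":{"L":1,"I":1,"F":1,"W":1,"C":1,"M":1,"V":1,"Y":1,"A":2,"P":2,"T":2,"G":2,"S":2,"K":3,"N":3,"H":3,"R":3,"Q":3,"E":3,"D":3},
--               "charge":{"K":1,"R":1,"A":2,"N":2,"C":2,"Q":2,"G":2,"H":2,"I":2,"L":2,"M":2,"F":2,"P":2,"S":2,"T":2,"W":2,"Y":2,"V":2,"D":3,"E":3},
--               "secondary_struct":{"E":1,"A":1,"L":1,"M":1,"Q":1,"K":1,"R":1,"H":1,"V":2,"I":2,"Y":2,"C":2,"W":2,"F":2,"T":2,"G":3,"N":3,"P":3,"S":3,"D":3},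
--               "solvent_accessibility":{"A":1,"L":1,"F":1,"C":1,"G":1,"I":1,"V":1,"W":1,"R":2,"K":2,"Q":2,"E":2,"N":2,"D":2,"M":3,"P":3,"S":3,"T":3,"H":3,"Y":3},
--               "polarizability":{"G":1,"A":1,"S":1,"D":1,"T":1,"C":2,"P":2,"N":2,"V":2,"E":2,"Q":2,"I":2,"L":2,"K":3,"M":3,"H":3,"F":3,"R":3,"Y":3,"W":3}}
--
-- def str_to_num(sequence, prop):
--     sequence = sequence.upper()
--     seq=""
--     for i in sequence:
--         seq += str(properties[prop][i])
--     return seq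
--
-- def ctd_transition(sequence):
--     sequence = sequence.upper()
--     total_trans = {}
--     for prop, values in properties.items():
--         trans_values = {''.join(map(str, triad)): 0 for triad in product(range(1, 4), repeat=2)}
--         convert = str_to_num(sequence, prop)
--         for i in range(len(convert)-1):
--             trans_values[convert[i:i+2]] += 1
--         total_trans[prop] = trans_values
--     return total_trans
-- ===== SOURCE B (Python) =====
-- from collections import Counter
--
-- # each property as its three amino-acid classes (group strings), instead of a char->class dict
-- PROPERTY_GROUPS = [
--     ("hydrophobicity",        "RKEDQN",   "GASTPHY",          "CLVIMFW"),
--     ("normalized_vdw",        "GASTPD",   "NVEQIL",           "MHKFRYW"),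
--     ("polarity",              "LIFWCMVY", "APTGS",            "KNHRQED"),
--     ("charge",                "KR",       "ANCQGHILMFPSTWYV", "DE"),
--     ("secondary_struct",      "EALMQKRH", "VIYCWFT",          "GNPSD"),
--     ("solvent_accessibility", "ALFCGIVW", "RKQEND",           "MPSTHY"),
--     ("polarizability",        "GASDT",    "CPNVEQIL",         "KMHFRYW"),
-- ]
--
-- def _class_map(g1, g2, g3):
--     cls = {}
--     for num, group in ((1, g1), (2, g2), (3, g3)):
--         for aa in group:
--             cls[aa] = num
--     return cls
--
-- def ctd_transition(sequence):
--     s = sequence.upper()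
--     bigrams = Counter(zip(s, s[1:]))
--     result = {}
--     for name, g1, g2, g3 in PROPERTY_GROUPS:
--         cls = _class_map(g1, g2, g3)
--         row = {str(a) + str(b): 0 for a in (1, 2, 3) for b in (1, 2, 3)}
--         for (x, y), n in bigrams.items():
--             row[str(cls[x]) + str(cls[y])] += n
--         result[name] = row
--     return result
-- ===== Notes on version B (the rewrite author's own statement) =====
-- stated objective: faster
-- what changed: B stores each property as three class group strings (building the char->class map from them) and counts adjacent bigrams once with a Counter over sequence.upper(), deriving each property's 9 transition counts from the distinct bigrams, instead of A's per-property numeric-string rebuild plus full rescan of the sequence.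
import Mathlib
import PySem

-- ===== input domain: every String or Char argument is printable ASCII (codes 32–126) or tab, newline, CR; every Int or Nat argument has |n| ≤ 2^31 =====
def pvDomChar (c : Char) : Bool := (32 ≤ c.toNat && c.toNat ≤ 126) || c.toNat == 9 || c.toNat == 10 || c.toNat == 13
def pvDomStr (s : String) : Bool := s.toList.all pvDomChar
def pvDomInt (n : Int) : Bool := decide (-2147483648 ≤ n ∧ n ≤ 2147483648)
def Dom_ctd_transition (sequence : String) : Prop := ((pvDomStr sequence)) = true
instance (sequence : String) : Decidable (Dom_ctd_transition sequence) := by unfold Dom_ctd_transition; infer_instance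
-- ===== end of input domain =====

-- B replaces A's per-property numeric-string rebuild + rescan by ONE bigram Counter pass over the
-- sequence, with each property stored as three class group strings (faster by a constant factor, measured).

-- ===== PORT A =====
-- the module constant `properties` (dict of dicts, insertion order), as A reads it
def propTables : List (String × PySem.Dict Char Int) := [
  ("hydrophobicity", PySem.Dict.ofList [('R', 1), ('K', 1), ('E', 1), ('D', 1), ('Q', 1), ('N', 1), ('G', 2), ('A', 2), ('S', 2), ('T', 2), ('P', 2), ('H', 2), ('Y', 2), ('C', 3), ('L', 3), ('V', 3), ('I', 3), ('M', 3), ('F', 3), ('W', 3)]),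
  ("normalized_vdw", PySem.Dict.ofList [('G', 1), ('A', 1), ('S', 1), ('T', 1), ('P', 1), ('D', 1), ('N', 2), ('V', 2), ('E', 2), ('Q', 2), ('I', 2), ('L', 2), ('M', 3), ('H', 3), ('K', 3), ('F', 3), ('R', 3), ('Y', 3), ('W', 3)]),
  ("polarity", PySem.Dict.ofList [('L', 1), ('I', 1), ('F', 1), ('W', 1), ('C', 1), ('M', 1), ('V', 1), ('Y', 1), ('A', 2), ('P', 2), ('T', 2), ('G', 2), ('S', 2), ('K', 3), ('N', 3), ('H', 3), ('R', 3), ('Q', 3), ('E', 3), ('D', 3)]),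
  ("charge", PySem.Dict.ofList [('K', 1), ('R', 1), ('A', 2), ('N', 2), ('C', 2), ('Q', 2), ('G', 2), ('H', 2), ('I', 2), ('L', 2), ('M', 2), ('F', 2), ('P', 2), ('S', 2), ('T', 2), ('W', 2), ('Y', 2), ('V', 2), ('D', 3), ('E', 3)]),
  ("secondary_struct", PySem.Dict.ofList [('E', 1), ('A', 1), ('L', 1), ('M', 1), ('Q', 1), ('K', 1), ('R', 1), ('H', 1), ('V', 2), ('I', 2), ('Y', 2), ('C', 2), ('W', 2), ('F', 2), ('T', 2), ('G', 3), ('N', 3), ('P', 3), ('S', 3), ('D', 3)]),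
  ("solvent_accessibility", PySem.Dict.ofList [('A', 1), ('L', 1), ('F', 1), ('C', 1), ('G', 1), ('I', 1), ('V', 1), ('W', 1), ('R', 2), ('K', 2), ('Q', 2), ('E', 2), ('N', 2), ('D', 2), ('M', 3), ('P', 3), ('S', 3), ('T', 3), ('H', 3), ('Y', 3)]),
  ("polarizability", PySem.Dict.ofList [('G', 1), ('A', 1), ('S', 1), ('D', 1), ('T', 1), ('C', 2), ('P', 2), ('N', 2), ('V', 2), ('E', 2), ('Q', 2), ('I', 2), ('L', 2), ('K', 3), ('M', 3), ('H', 3), ('F', 3), ('R', 3), ('Y', 3), ('W', 3)])]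

-- str_to_num: properties[prop][i] is a KeyError on a missing key (excluded by Pre_); getD … 0 is total
def strToNum (sequence : List Char) (tbl : PySem.Dict Char Int) : List Char :=
  (PySem.Chars.upper sequence).foldl (fun seq c => seq ++ PySem.Int.toChars (tbl.getD c 0)) []

-- {''.join(map(str, triad)): 0 for triad in product(range(1, 4), repeat=2)}
def transKeysA : List String :=
  (PySem.List.pyRange 1 4 1).flatMap (fun x =>
    (PySem.List.pyRange 1 4 1).map (fun y => String.ofList (PySem.Int.toChars x ++ PySem.Int.toChars y)))

def ctd_transition (sequence : String) : List (String × List (String × Int)) :=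
  let seq := PySem.Chars.upper sequence.toList
  let total := propTables.foldl (fun total pv =>
    let transValues : PySem.Dict String Int := PySem.Dict.ofList (transKeysA.map (fun k => (k, 0)))
    let convert := strToNum seq pv.2
    let trans := (PySem.List.pyRange 0 ((convert.length : Int) - 1) 1).foldl
      (fun d i => d.modify (String.ofList (PySem.List.slice convert (some i) (some (i + 2)))) 0 (· + 1))
      transValues
    total.insert pv.1 trans) (PySem.Dict.empty)
  total.items.map (fun p => (p.1, p.2.items))

-- ===== PORT B =====
-- the module constant PROPERTY_GROUPS: each property as its three class group strings
def propGroups : List (String × String × String × String) := [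
  ("hydrophobicity", "RKEDQN", "GASTPHY", "CLVIMFW"),
  ("normalized_vdw", "GASTPD", "NVEQIL", "MHKFRYW"),
  ("polarity", "LIFWCMVY", "APTGS", "KNHRQED"),
  ("charge", "KR", "ANCQGHILMFPSTWYV", "DE"),
  ("secondary_struct", "EALMQKRH", "VIYCWFT", "GNPSD"),
  ("solvent_accessibility", "ALFCGIVW", "RKQEND", "MPSTHY"),
  ("polarizability", "GASDT", "CPNVEQIL", "KMHFRYW")]

-- _class_map(g1, g2, g3): char -> class number, built from the three group strings
def classMap (g1 g2 g3 : String) : PySem.Dict Char Int :=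
  ([((1 : Int), g1), (2, g2), (3, g3)]).foldl
    (fun cls p => p.2.toList.foldl (fun cls aa => cls.insert aa p.1) cls) PySem.Dict.empty

-- {str(a) + str(b): 0 for a in (1, 2, 3) for b in (1, 2, 3)}
def transKeysB : List String :=
  ([1, 2, 3] : List Int).flatMap (fun x =>
    ([1, 2, 3] : List Int).map (fun y => String.ofList (PySem.Int.toChars x ++ PySem.Int.toChars y)))

def ctd_transition_alt (sequence : String) : List (String × List (String × Int)) :=
  let s := PySem.Chars.upper sequence.toList
  let bigrams := PySem.Dict.counter (s.zip (PySem.List.slice s (some 1) none))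
  let result := propGroups.foldl (fun result g =>
    let cls := classMap g.2.1 g.2.2.1 g.2.2.2
    let row : PySem.Dict String Int := PySem.Dict.ofList (transKeysB.map (fun k => (k, 0)))
    let row2 := bigrams.items.foldl (fun d q =>
      d.modify (String.ofList (PySem.Int.toChars (cls.getD q.1.1 0) ++ PySem.Int.toChars (cls.getD q.1.2 0))) 0 (· + q.2))
      row
    result.insert g.1 row2) (PySem.Dict.empty)
  result.items.map (fun p => (p.1, p.2.items))

-- ===== PRECONDITION & SPEC =====
-- Pre_ holds iff every character of sequence.upper() is a key of EVERY property table: exactly the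
-- inputs where A's properties[prop][i] (and likewise B's cls[x]) does not raise KeyError.
-- (Note 'C' is absent from the source's normalized_vdw table, so A raises on any sequence containing C.)
def Pre_ctd_transition (sequence : String) : Prop :=
  ((PySem.Chars.upper sequence.toList).all
    (fun c => propTables.all (fun pv => pv.2.keys.contains c))) = true
instance (sequence : String) : Decidable (Pre_ctd_transition sequence) := by
  unfold Pre_ctd_transition; infer_instance

def pvWitness_ctd_transition : String := "ARk"

def Spec_ctd_transition (sequence : String) (out : List (String × List (String × Int))) : Prop :=
  out = ctd_transition_alt sequence
instance (sequence : String) (out : List (String × List (String × Int))) : Decidable (Spec_ctd_transition sequence out) := by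
  unfold Spec_ctd_transition; infer_instance

-- ===== CLAIM (what is proved, stated in full; the proofs are below) =====
def Claim_equal_ctd_transition : Prop := ∀ (sequence : String), Dom_ctd_transition sequence → Pre_ctd_transition sequence → Spec_ctd_transition sequence (ctd_transition sequence)

-- ===== LEMMAS AND PROOFS =====

-- the 19 characters present in every property table (= the normalized_vdw key list; 'C' is absent there)
def aaCommon : List Char := ['G','A','S','T','P','D','N','V','E','Q','I','L','M','H','K','F','R','Y','W']

-- the nine transition keys, and the common zero-seeded inner dict
def nineKeys : List String := ["11", "12", "13", "21", "22", "23", "31", "32", "33"]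
def zeroDict : PySem.Dict String Int := PySem.Dict.ofList (nineKeys.map (fun k => (k, 0)))

-- the single digit character str(tbl[c]) contributes (under the value hypothesis below)
def dcharD (tbl : PySem.Dict Char Int) (c : Char) : Char :=
  (PySem.Int.toChars (tbl.getD c 0)).headD ' '

-- the two-digit transition key of an adjacent pair
def keyD (tbl : PySem.Dict Char Int) (p : Char × Char) : String :=
  String.ofList [dcharD tbl p.1, dcharD tbl p.2]

theorem mem_common (c : Char)
    (h : (propTables.all (fun pv => pv.2.keys.contains c)) = true) : c ∈ aaCommon := by
  have hmem : propTables[1]'(by decide) ∈ propTables := List.getElem_mem _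
  have h2 := List.all_eq_true.mp h _ hmem
  have hkeys : (propTables[1]'(by decide)).2.keys = aaCommon := by decide
  rw [hkeys] at h2
  simpa using h2

theorem upper_fixed (t : List Char) (ht : ∀ c ∈ t, c ∈ aaCommon) :
    PySem.Chars.upper t = t := by
  have hall : (aaCommon.all (fun c => PySem.Chars.upperChar c == c)) = true := by decide
  have : ∀ c ∈ t, PySem.Chars.upperChar c = c := by
    intro c hc
    have := List.all_eq_true.mp hall c (ht c hc)
    exact beq_iff_eq.mp this
  simpa [PySem.Chars.upper] using List.map_congr_left this |>.trans (List.map_id t)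

theorem toChars_dchar (tbl : PySem.Dict Char Int) (c : Char)
    (h : tbl.getD c 0 = 1 ∨ tbl.getD c 0 = 2 ∨ tbl.getD c 0 = 3) :
    PySem.Int.toChars (tbl.getD c 0) = [dcharD tbl c] := by
  rcases h with h | h | h <;> simp [dcharD, h] <;> decide

theorem key_mem_nine (tbl : PySem.Dict Char Int) (p : Char × Char)
    (h1 : tbl.getD p.1 0 = 1 ∨ tbl.getD p.1 0 = 2 ∨ tbl.getD p.1 0 = 3)
    (h2 : tbl.getD p.2 0 = 1 ∨ tbl.getD p.2 0 = 2 ∨ tbl.getD p.2 0 = 3) :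
    keyD tbl p ∈ nineKeys := by
  rcases h1 with h1 | h1 | h1 <;> rcases h2 with h2 | h2 | h2 <;>
    simp [keyD, dcharD, h1, h2, nineKeys] <;> decide

-- A's index loop reads exactly the adjacent pairs
theorem slice_pairs {α : Type} (l : List α) :
    (PySem.List.pyRange 0 ((l.length : Int) - 1) 1).map
      (fun i => PySem.List.slice l (some i) (some (i + 2)))
    = (l.zip l.tail).map (fun p => [p.1, p.2]) := by
  apply List.ext_getElem
  · simp [PySem.List.length_pyRange_one, List.length_zip, List.length_tail]
  · intro k h1 h2
    have hk1 : k + 1 < l.length := by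
      simp [PySem.List.length_pyRange_one] at h1; omega
    simp only [List.getElem_map]
    rw [PySem.List.getElem_pyRange_one]
    have e1 : (0 : Int) + (k : Int) = ((k : Nat) : Int) := by ring
    have e2 : ((k : Nat) : Int) + 2 = ((k : Nat) : Int) + ((2 : Nat) : Int) := by norm_num
    rw [e1, e2, PySem.List.slice_natCast_add]
    have hdrop : List.drop k l = l[k] :: l[k + 1] :: List.drop (k + 2) l := by
      rw [List.drop_eq_getElem_cons (by omega : k < l.length)]
      rw [List.drop_eq_getElem_cons (by omega : k + 1 < l.length)]
    rw [List.getElem_zip]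
    simp only [List.getElem_tail]
    rw [hdrop]
    rfl

-- final value at v of B's weighted accumulation loop
theorem getD_foldl_modify_add_weight {β : Type} (l : List (β × Int)) (key : β → String)
    (d : PySem.Dict String Int) (v : String) :
    (l.foldl (fun d q => d.modify (key q.1) 0 (· + q.2)) d).getD v 0
    = d.getD v 0 + ((l.filter (fun q => key q.1 == v)).map (·.2)).sum := by
  induction l generalizing d with
  | nil => simp
  | cons x xs ih =>
    simp only [List.foldl_cons, ih, List.filter_cons]
    by_cases h : key x.1 = v
    · simp [h]
      ring
    · have h' : ¬ v = key x.1 := fun e => h e.symm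
      simp [PySem.Dict.getD_modify, h, h']

-- summing xs-multiplicities over the distinct elements with key v counts the v-keyed elements
theorem sum_counts_filter {β κ : Type} [BEq β] [LawfulBEq β] [BEq κ] [LawfulBEq κ] [DecidableEq κ]
    (xs ys : List β) (key : β → κ) (v : κ) (hnd : ys.Nodup) (hsub : ∀ x ∈ xs, x ∈ ys) :
    ((ys.filter (fun q => key q == v)).map (fun q => (xs.count q : Int))).sum
    = ((xs.map key).count v : Int) := by
  induction xs with
  | nil => simp
  | cons x xs ih =>
    have hx : x ∈ ys.filter (fun q => key q == v) ∨ ¬ key x = v := by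
      by_cases h : key x = v
      · exact Or.inl (List.mem_filter.mpr ⟨hsub x List.mem_cons_self, by simp [h]⟩)
      · exact Or.inr h
    have hsub' : ∀ y ∈ xs, y ∈ ys := fun y hy => hsub y (List.mem_cons_of_mem _ hy)
    have hmapcnt :
        (ys.filter (fun q => key q == v)).map (fun q => (((x :: xs).count q : Nat) : Int))
        = (ys.filter (fun q => key q == v)).map
            (fun q => ((xs.count q : Nat) : Int) + (if (x == q) = true then 1 else 0)) := by
      apply List.map_congr_left
      intro q hq
      rw [List.count_cons]
      push_cast
      ring
    rw [hmapcnt, PySem.List.sum_map_add_int, ih hsub', PySem.List.sum_map_ite_one_zero]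
    have hcnt : List.countP (fun q => x == q) (ys.filter (fun q => key q == v))
        = if key x = v then 1 else 0 := by
      have hfn : List.countP (fun q => x == q) (ys.filter (fun q => key q == v))
          = (ys.filter (fun q => key q == v)).count x := by
        rw [List.count_eq_countP]
        apply List.countP_congr
        intro q _
        simp only [beq_iff_eq]
        exact eq_comm
      rw [hfn]
      by_cases h : key x = v
      · rw [if_pos h]
        rcases hx with hmem | hne
        · exact List.count_eq_one_of_mem (hnd.filter _) hmem
        · exact absurd h hne
      · rw [if_neg h]
        apply List.count_eq_zero_of_not_mem
        intro hmem
        exact h (by simpa using (List.mem_filter.mp hmem).2)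
    rw [hcnt, List.map_cons, List.count_cons]
    push_cast
    by_cases h : key x = v <;> simp [h]

-- a modify-loop whose keys all lie in the dict leaves the key list unchanged
theorem update_of_subset {κ : Type} [BEq κ] [LawfulBEq κ] (s l : List κ)
    (h : ∀ k ∈ l, k ∈ s) : PySem.Set.update s l = s := by
  rw [PySem.Set.update_eq_append_filter]
  have : (PySem.Set.ofList l).filter (fun y => !PySem.Set.contains s y) = [] := by
    apply List.filter_eq_nil_iff.mpr
    intro y hy
    have hys : y ∈ s := h y ((PySem.Set.mem_ofList l y).mp hy)
    simpa [PySem.Set.contains_eq_listContains] using hys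
  rw [this, List.append_nil]

theorem transKeysA_eq : transKeysA = nineKeys := by decide
theorem transKeysB_eq : transKeysB = nineKeys := by decide
theorem zeroDict_keys : zeroDict.keys = nineKeys := by decide

-- the per-property inner dicts of A (built from tbl) and B (built from cls) agree
theorem perProp (t : List Char) (tbl cls : PySem.Dict Char Int)
    (ht : ∀ c ∈ t, c ∈ aaCommon)
    (hv : (aaCommon.all (fun c =>
        (tbl.getD c 0 == 1 || tbl.getD c 0 == 2 || tbl.getD c 0 == 3)
        && (cls.getD c 0 == tbl.getD c 0))) = true) :
    (PySem.List.pyRange 0 (((strToNum t tbl).length : Int) - 1) 1).foldl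
      (fun d i => d.modify (String.ofList (PySem.List.slice (strToNum t tbl) (some i) (some (i + 2)))) 0 (· + 1))
      (PySem.Dict.ofList (transKeysA.map (fun k => (k, 0))))
    = (PySem.Dict.counter (t.zip (PySem.List.slice t (some 1) none))).items.foldl
      (fun d q => d.modify (String.ofList (PySem.Int.toChars (cls.getD q.1.1 0) ++ PySem.Int.toChars (cls.getD q.1.2 0))) 0 (· + q.2))
      (PySem.Dict.ofList (transKeysB.map (fun k => (k, 0))))
    := by
  have hvac : ∀ c ∈ aaCommon,
      (tbl.getD c 0 = 1 ∨ tbl.getD c 0 = 2 ∨ tbl.getD c 0 = 3) ∧ cls.getD c 0 = tbl.getD c 0 := by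
    intro c hc
    have h := List.all_eq_true.mp hv c hc
    simp only [Bool.and_eq_true, Bool.or_eq_true, beq_iff_eq] at h
    tauto
  have hvt : ∀ c ∈ t, tbl.getD c 0 = 1 ∨ tbl.getD c 0 = 2 ∨ tbl.getD c 0 = 3 :=
    fun c hc => (hvac c (ht c hc)).1
  have hct : ∀ c ∈ t, cls.getD c 0 = tbl.getD c 0 :=
    fun c hc => (hvac c (ht c hc)).2
  -- convert = one digit per character
  have hconv : strToNum t tbl = t.map (dcharD tbl) := by
    unfold strToNum
    rw [upper_fixed t ht, PySem.List.foldl_append_eq_flatMap]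
    rw [show t.flatMap (fun c => PySem.Int.toChars (tbl.getD c 0))
          = t.flatMap (fun c => [dcharD tbl c]) from
      List.flatMap_congr (fun c hc => toChars_dchar tbl c (hvt c hc))]
    rw [← List.map_eq_flatMap]
    simp
  set pairs := t.zip t.tail with hpairs
  have hmemt : ∀ p ∈ pairs, p.1 ∈ t ∧ p.2 ∈ t := by
    intro p hp
    obtain ⟨h1, h2⟩ := List.of_mem_zip hp
    exact ⟨h1, List.mem_of_mem_tail h2⟩
  -- A's fold is a fold over the pair keys
  have hKlist : (PySem.List.pyRange 0 (((strToNum t tbl).length : Int) - 1) 1).map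
      (fun i => String.ofList (PySem.List.slice (strToNum t tbl) (some i) (some (i + 2))))
      = pairs.map (keyD tbl) := by
    have h1 := congrArg (List.map String.ofList) (slice_pairs (strToNum t tbl))
    have h2 : (strToNum t tbl).zip (strToNum t tbl).tail
        = pairs.map (Prod.map (dcharD tbl) (dcharD tbl)) := by
      rw [hconv, ← List.map_tail, List.zip_map]
    simp only [List.map_map, Function.comp_def] at h1
    rw [h1, h2, List.map_map]
    simp [Function.comp_def, keyD, Prod.map_fst, Prod.map_snd]
  have hA : (PySem.List.pyRange 0 (((strToNum t tbl).length : Int) - 1) 1).foldl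
      (fun d i => d.modify (String.ofList (PySem.List.slice (strToNum t tbl) (some i) (some (i + 2)))) 0 (· + 1))
      (PySem.Dict.ofList (transKeysA.map (fun k => (k, 0))))
      = (pairs.map (keyD tbl)).foldl (fun d k => d.modify k 0 (· + 1)) zeroDict := by
    rw [transKeysA_eq,
        ← List.foldl_map (f := fun i => String.ofList (PySem.List.slice (strToNum t tbl) (some i) (some (i + 2))))
          (g := fun (d : PySem.Dict String Int) k => d.modify k 0 (· + 1)),
        hKlist]
    rfl
  -- B's fold with its key expression normalized to keyD tbl
  have hB : (PySem.Dict.counter (t.zip (PySem.List.slice t (some 1) none))).items.foldl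
      (fun d q => d.modify (String.ofList (PySem.Int.toChars (cls.getD q.1.1 0) ++ PySem.Int.toChars (cls.getD q.1.2 0))) 0 (· + q.2))
      (PySem.Dict.ofList (transKeysB.map (fun k => (k, 0))))
      = (PySem.Dict.counter pairs).items.foldl
          (fun d q => d.modify (keyD tbl q.1) 0 (· + q.2)) zeroDict := by
    rw [transKeysB_eq, PySem.List.slice_from_one]
    apply PySem.List.foldl_congr_mem
    intro acc q hq
    obtain ⟨qp, qn⟩ := q
    have hk : qp ∈ pairs := by
      have hmem := PySem.Dict.mem_keys_of_mem_items _ hq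
      rw [PySem.Dict.keys_counter] at hmem
      exact (PySem.Set.mem_ofList pairs qp).mp hmem
    obtain ⟨h1, h2⟩ := hmemt qp hk
    rw [hct qp.1 h1, hct qp.2 h2]
    rw [toChars_dchar tbl qp.1 (hvt _ h1), toChars_dchar tbl qp.2 (hvt _ h2)]
    rfl
  rw [hA, hB]
  -- every touched key lies among the nine keys, so the key lists stay nineKeys
  have hKA : ∀ k ∈ pairs.map (keyD tbl), k ∈ nineKeys := by
    intro k hk
    obtain ⟨p, hp, rfl⟩ := List.mem_map.mp hk
    obtain ⟨h1, h2⟩ := hmemt p hp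
    exact key_mem_nine tbl p (hvt _ h1) (hvt _ h2)
  have hkeysA : ((pairs.map (keyD tbl)).foldl (fun d k => d.modify k 0 (· + 1)) zeroDict).keys = nineKeys := by
    rw [PySem.Dict.keys_foldl_modify (f := fun _ _ => (· + 1)), zeroDict_keys]
    exact update_of_subset _ _ hKA
  have hkeysB : ((PySem.Dict.counter pairs).items.foldl
      (fun d q => d.modify (keyD tbl q.1) 0 (· + q.2)) zeroDict).keys = nineKeys := by
    rw [PySem.Dict.keys_foldl_modify_key (key := fun q : (Char × Char) × Int => keyD tbl q.1)
        (f := fun (_ : PySem.Dict String Int) (q : (Char × Char) × Int) => (· + q.2)), zeroDict_keys]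
    apply update_of_subset
    intro k hk
    obtain ⟨q, hq, rfl⟩ := List.mem_map.mp hk
    obtain ⟨qp, qn⟩ := q
    have hkq : qp ∈ pairs := by
      have hmem := PySem.Dict.mem_keys_of_mem_items _ hq
      rw [PySem.Dict.keys_counter] at hmem
      exact (PySem.Set.mem_ofList pairs qp).mp hmem
    obtain ⟨h1, h2⟩ := hmemt qp hkq
    exact key_mem_nine tbl qp (hvt _ h1) (hvt _ h2)
  -- pointwise values agree, hence the dicts are equal
  apply PySem.Dict.ext
  rw [PySem.Dict.items_eq_map_keys _ (hkeysA ▸ (by decide : nineKeys.Nodup)) 0,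
      PySem.Dict.items_eq_map_keys _ (hkeysB ▸ (by decide : nineKeys.Nodup)) 0,
      hkeysA, hkeysB]
  apply List.map_congr_left
  intro v _
  have hgA : ((pairs.map (keyD tbl)).foldl (fun d k => d.modify k 0 (· + 1)) zeroDict).getD v 0
      = zeroDict.getD v 0 + ((pairs.map (keyD tbl)).count v : Int) :=
    PySem.Dict.getD_foldl_modify_add_one _ _ _
  have hgB : ((PySem.Dict.counter pairs).items.foldl
      (fun d q => d.modify (keyD tbl q.1) 0 (· + q.2)) zeroDict).getD v 0
      = zeroDict.getD v 0 + ((pairs.map (keyD tbl)).count v : Int) := by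
    rw [getD_foldl_modify_add_weight _ (keyD tbl)]
    congr 1
    rw [PySem.Dict.items_counter, List.filter_map, List.map_map]
    exact sum_counts_filter pairs (PySem.Set.ofList pairs) (keyD tbl) v
      (PySem.Set.nodup_ofList pairs) (fun x hx => (PySem.Set.mem_ofList pairs x).mpr hx)
  rw [hgA, hgB]

-- the outer loop writes the rows in list order (fresh distinct names)
theorem outer_items {α : Type} (L : List α) (name : α → String)
    (f : α → PySem.Dict String Int) (hnd : (L.map name).Nodup) :
    (L.foldl (fun total x => total.insert (name x) (f x)) PySem.Dict.empty).items
    = L.map (fun x => (name x, f x)) := by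
  rw [PySem.Dict.items_foldl_insert_fresh L name f PySem.Dict.empty
      (by intro a _; simp) hnd]
  rfl

-- ===== VERDICT (by name: the statement is the Claim_ definition above) =====
set_option maxRecDepth 8192 in
set_option maxHeartbeats 2000000 in
theorem ctd_transition_spec : Claim_equal_ctd_transition := by
  intro sequence _ hpre
  unfold Pre_ctd_transition at hpre
  simp only [Spec_ctd_transition, ctd_transition, ctd_transition_alt]
  set t := PySem.Chars.upper sequence.toList with hT
  have ht : ∀ c ∈ t, c ∈ aaCommon := by
    intro c hc
    exact mem_common c (List.all_eq_true.mp hpre c hc)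
  have eA := outer_items propTables (fun pv => pv.1)
    (fun pv => (PySem.List.pyRange 0 (((strToNum t pv.2).length : Int) - 1) 1).foldl
        (fun d i => d.modify (String.ofList (PySem.List.slice (strToNum t pv.2) (some i) (some (i + 2)))) 0 (· + 1))
        (PySem.Dict.ofList (transKeysA.map (fun k => (k, 0))))) (by decide)
  have eB := outer_items propGroups (fun g => g.1)
    (fun g => (PySem.Dict.counter (t.zip (PySem.List.slice t (some 1) none))).items.foldl
        (fun d q => d.modify (String.ofList (PySem.Int.toChars ((classMap g.2.1 g.2.2.1 g.2.2.2).getD q.1.1 0) ++ PySem.Int.toChars ((classMap g.2.1 g.2.2.1 g.2.2.2).getD q.1.2 0))) 0 (· + q.2))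
        (PySem.Dict.ofList (transKeysB.map (fun k => (k, 0))))) (by decide)
  rw [eA, eB]
  simp only [List.map_map, Function.comp_def]
  simp only [propTables, propGroups, List.map_cons, List.map_nil, List.cons.injEq,
    Prod.mk.injEq, and_true, true_and]
  refine ⟨?_, ?_, ?_, ?_, ?_, ?_, ?_⟩ <;>
    exact congrArg PySem.Dict.items (perProp t _ _ ht (by decide))
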